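-- pv_equiv track=rewrite | github.com/jonny-ramos/wordle | wordle/wordle.py | used_l
-- ===== SOURCE A (Python) =====
-- def used_l(row, evals):
--     used_l = []
--     for letter in row:
--         for l_eval in evals:
--             for l, c in l_eval:
--                 if letter == l:
--                     if c == 'grey':
--                         used_l.append((l, 'white'))
--                     else:
--                         used_l.append((l, c))
--     d_used_l = dict(used_l)
--
--     return d_used_l
-- ===== SOURCE B (Python) =====
-- def used_l(row, evals):
--     # One pass over all eval pairs builds a letter->color table (later matches
--     # overwrite, grey mapped to white), then one pass over row picks the colors
--     # in row first-appearance order.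
--     table = {}
--     for l_eval in evals:
--         for l, c in l_eval:
--             table[l] = 'white' if c == 'grey' else c
--     result = {}
--     for letter in row:
--         if letter in table:
--             result[letter] = table[letter]
--     return result
-- ===== Notes on version B (the rewrite author's own statement) =====
-- stated objective: faster
-- what changed: Replaces A's triple-nested per-row-letter rescan of all eval pairs by one table-building pass over the eval pairs (letter->color dict, later matches overwrite, grey->white) followed by one lookup pass over row.
import Mathlib
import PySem

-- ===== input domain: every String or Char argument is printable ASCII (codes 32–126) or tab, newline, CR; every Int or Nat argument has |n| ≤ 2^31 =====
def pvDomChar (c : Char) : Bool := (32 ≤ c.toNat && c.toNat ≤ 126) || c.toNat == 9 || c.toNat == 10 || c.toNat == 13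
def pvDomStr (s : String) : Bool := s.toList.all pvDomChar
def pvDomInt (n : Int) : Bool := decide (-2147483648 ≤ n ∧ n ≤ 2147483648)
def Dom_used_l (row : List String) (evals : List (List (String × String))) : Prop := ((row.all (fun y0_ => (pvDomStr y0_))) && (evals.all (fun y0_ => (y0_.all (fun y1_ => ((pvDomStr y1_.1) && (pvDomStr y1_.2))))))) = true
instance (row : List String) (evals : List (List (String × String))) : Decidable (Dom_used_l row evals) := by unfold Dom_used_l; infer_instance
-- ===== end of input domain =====

-- B replaces A's triple-nested per-row-letter rescan of all eval pairs by one table-building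
-- pass over the eval pairs followed by one lookup pass over row (objective: faster).

-- ===== PORT A =====
def used_l (row : List String) (evals : List (List (String × String))) : List (String × String) :=
  let used := row.foldl (fun acc letter =>
    evals.foldl (fun acc l_eval =>
      l_eval.foldl (fun acc p =>
        if letter == p.1 then
          if p.2 == "grey" then acc ++ [(p.1, "white")] else acc ++ [(p.1, p.2)]
        else acc) acc) acc) []
  (PySem.Dict.ofList used).items

-- ===== PORT B =====
def used_l_alt (row : List String) (evals : List (List (String × String))) : List (String × String) :=
  let table := evals.foldl (fun t l_eval =>
    l_eval.foldl (fun t p =>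
      t.insert p.1 (if p.2 == "grey" then "white" else p.2)) t) PySem.Dict.empty
  let result := row.foldl (fun r letter =>
    match table.get? letter with
    | some c => r.insert letter c
    | none => r) PySem.Dict.empty
  result.items

-- ===== PRECONDITION & SPEC =====
def Spec_used_l (row : List String) (evals : List (List (String × String))) (out : List (String × String)) : Prop := out = used_l_alt row evals
instance (row : List String) (evals : List (List (String × String))) (out : List (String × String)) : Decidable (Spec_used_l row evals out) := by unfold Spec_used_l; infer_instance

-- ===== CLAIM (what is proved, stated in full; the proofs are below) =====
def Claim_equal_used_l : Prop := ∀ (row : List String) (evals : List (List (String × String))), Dom_used_l row evals → Spec_used_l row evals (used_l row evals)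

-- ===== LEMMAS AND PROOFS =====

-- the transformation A and B both apply to an eval pair
def pvF (p : String × String) : String × String := (p.1, if p.2 == "grey" then "white" else p.2)

-- the pairs of evals that match `letter`, in scan order, already transformed
def pvMatches (evals : List (List (String × String))) (letter : String) : List (String × String) :=
  ((evals.flatMap id).filter (fun p => letter == p.1)).map pvF

theorem pv_beq_comm (a b : String) : (a == b) = (b == a) := by
  by_cases h : a = b
  · subst h; rfl
  · rw [beq_eq_false_iff_ne.mpr h, beq_eq_false_iff_ne.mpr (Ne.symm h)]

theorem pv_map_or {α β : Type} (o o' : Option α) (f : α → β) :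
    (o.or o').map f = (o.map f).or (o'.map f) := by
  cases o <;> simp

theorem pv_getLast?_cons_or {α : Type} (a : α) (l : List α) :
    (a :: l).getLast? = l.getLast?.or (some a) := by
  cases l with
  | nil => rfl
  | cons b t =>
    rw [List.getLast?_cons_cons]
    cases h : (b :: t).getLast? with
    | none => exact absurd (List.getLast?_eq_none_iff.mp h) (by simp)
    | some v => rfl

-- A's inner pair loop appends the matching transformed pairs
theorem pvA_inner (letter : String) (ps : List (String × String)) (acc : List (String × String)) :
    ps.foldl (fun acc p =>
      if letter == p.1 then
        if p.2 == "grey" then acc ++ [(p.1, "white")] else acc ++ [(p.1, p.2)]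
      else acc) acc
    = acc ++ (ps.filter (fun p => letter == p.1)).map pvF := by
  induction ps generalizing acc with
  | nil => simp
  | cons p t ih =>
    rw [List.foldl_cons, ih, List.filter_cons]
    by_cases h : (letter == p.1) = true
    · have he : letter = p.1 := by simpa using h
      rw [if_pos h]
      by_cases hg : (p.2 == "grey") = true
      · rw [if_pos hg]; simp [he, pvF, hg]
      · rw [if_neg hg]; simp [he, pvF, hg]
    · rw [if_neg h, if_neg h]

-- A's double loop over evals appends pvMatches
theorem pvA_outer (letter : String) (evals : List (List (String × String))) (acc : List (String × String)) :
    evals.foldl (fun acc l_eval =>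
      l_eval.foldl (fun acc p =>
        if letter == p.1 then
          if p.2 == "grey" then acc ++ [(p.1, "white")] else acc ++ [(p.1, p.2)]
        else acc) acc) acc
    = acc ++ pvMatches evals letter := by
  induction evals generalizing acc with
  | nil => simp [pvMatches]
  | cons e t ih =>
    rw [List.foldl_cons, pvA_inner, ih]
    simp [pvMatches, List.filter_append, List.append_assoc]

-- B's table is the insert-fold of the transformed flattened pair stream
theorem pvB_table (evals : List (List (String × String))) (t : PySem.Dict String String) :
    evals.foldl (fun t l_eval =>
      l_eval.foldl (fun t p =>
        t.insert p.1 (if p.2 == "grey" then "white" else p.2)) t) t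
    = ((evals.flatMap id).map pvF).foldl (fun d p => d.insert p.1 p.2) t := by
  induction evals generalizing t with
  | nil => rfl
  | cons e tl ih =>
    simp only [List.foldl_cons, List.flatMap_cons, List.map_append, List.foldl_append, ih,
      List.foldl_map, id, pvF]

-- lookup in an insert-fold: the last matching value, else the initial dict's value
theorem pv_get_foldl_insert (xs : List (String × String)) (d : PySem.Dict String String) (k : String) :
    (xs.foldl (fun d p => d.insert p.1 p.2) d).get? k
    = ((xs.filter (fun p => p.1 == k)).getLast?.map Prod.snd).or (d.get? k) := by
  induction xs generalizing d with
  | nil => simp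
  | cons p t ih =>
    rw [List.foldl_cons, ih, List.filter_cons]
    by_cases h : p.1 = k
    · have hb : (p.1 == k) = true := by simp [h]
      rw [if_pos hb, pv_getLast?_cons_or, pv_map_or, PySem.Dict.get?_insert]
      simp [h]
    · have hb : (p.1 == k) = false := by simp [h]
      rw [if_neg (by simp [hb]), PySem.Dict.get?_insert, if_neg (fun hk => h hk.symm)]

-- inserting a block of pairs that all share key k collapses to at most one insert
theorem pv_foldl_insert_same_key (k : String) (vs : List (String × String))
    (h : ∀ p ∈ vs, p.1 = k) (d : PySem.Dict String String) :
    vs.foldl (fun d p => d.insert p.1 p.2) d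
    = match vs.getLast?.map Prod.snd with
      | some v => d.insert k v
      | none => d := by
  induction vs generalizing d with
  | nil => rfl
  | cons p t ih =>
    have hk : p.1 = k := h p (by simp)
    have ht : ∀ q ∈ t, q.1 = k := fun q hq => h q (by simp [hq])
    simp only [List.foldl_cons, ih ht, pv_getLast?_cons_or, pv_map_or]
    cases hl : t.getLast?.map Prod.snd with
    | none => simp [hk]
    | some w => simp [hk, PySem.Dict.insert_insert_self]

-- every pair of pvMatches has key `letter`
theorem pv_matches_key (evals : List (List (String × String))) (letter : String) :
    ∀ p ∈ pvMatches evals letter, p.1 = letter := by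
  intro p hp
  simp only [pvMatches, List.mem_map, List.mem_filter] at hp
  obtain ⟨q, ⟨_, hq⟩, rfl⟩ := hp
  exact ((beq_iff_eq).mp hq).symm

-- the filtered-then-transformed stream is the transform-then-filter stream
theorem pv_matches_eq (evals : List (List (String × String))) (letter : String) :
    ((evals.flatMap id).map pvF).filter (fun p => p.1 == letter) = pvMatches evals letter := by
  rw [pvMatches, List.filter_map]
  congr 1
  apply List.filter_congr
  intro q _
  simp only [Function.comp_apply, pvF, pv_beq_comm]

-- B's table lookup returns the last transformed matching pair's color
theorem pv_table_get (evals : List (List (String × String))) (letter : String) :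
    (evals.foldl (fun t l_eval =>
      l_eval.foldl (fun t p =>
        t.insert p.1 (if p.2 == "grey" then "white" else p.2)) t) PySem.Dict.empty).get? letter
    = (pvMatches evals letter).getLast?.map Prod.snd := by
  rw [pvB_table, pv_get_foldl_insert, pv_matches_eq]
  simp

-- main loop lemma: inserting A's per-letter blocks equals B's per-letter lookup loop
theorem pv_main (evals : List (List (String × String))) (row : List String) (d : PySem.Dict String String) :
    (row.flatMap (pvMatches evals)).foldl (fun d p => d.insert p.1 p.2) d
    = row.foldl (fun r letter =>
        match (evals.foldl (fun t l_eval =>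
          l_eval.foldl (fun t p =>
            t.insert p.1 (if p.2 == "grey" then "white" else p.2)) t) PySem.Dict.empty).get? letter with
        | some c => r.insert letter c
        | none => r) d := by
  induction row generalizing d with
  | nil => rfl
  | cons letter t ih =>
    simp only [List.flatMap_cons, List.foldl_append, List.foldl_cons, ← ih]
    congr 1
    rw [pv_foldl_insert_same_key letter (pvMatches evals letter) (pv_matches_key evals letter) d,
      pv_table_get]

-- A's whole accumulation loop produces the per-letter match blocks in row order
theorem pvA_all (evals : List (List (String × String))) (row : List String) (acc : List (String × String)) :
    row.foldl (fun acc letter =>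
      evals.foldl (fun acc l_eval =>
        l_eval.foldl (fun acc p =>
          if letter == p.1 then
            if p.2 == "grey" then acc ++ [(p.1, "white")] else acc ++ [(p.1, p.2)]
          else acc) acc) acc) acc
    = acc ++ row.flatMap (pvMatches evals) := by
  induction row generalizing acc with
  | nil => simp
  | cons letter t ih =>
    rw [List.foldl_cons, pvA_outer, ih]
    simp [List.append_assoc]

-- ===== VERDICT (by name: the statement is the Claim_ definition above) =====
theorem used_l_spec : Claim_equal_used_l := by
  intro row evals _
  show used_l row evals = used_l_alt row evals
  simp only [used_l, used_l_alt]
  rw [pvA_all, List.nil_append]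
  show (PySem.Dict.ofList (row.flatMap (pvMatches evals))).items = _
  rw [show PySem.Dict.ofList (row.flatMap (pvMatches evals))
        = (row.flatMap (pvMatches evals)).foldl (fun d p => d.insert p.1 p.2) PySem.Dict.empty
      from rfl,
    pv_main]
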